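-- pv_equiv track=rewrite | github.com/GaryBriceno/prueba_w | solution_01/01.py | get_happiness
-- ===== SOURCE A (Python) =====
-- def get_happiness(numbers, like_numbers, dislike_numbers):
--     """
--     This function get the happiness, consider all the element
--     in the array
--     """
--     happines = 0
--     for element in numbers:
--         if element in like_numbers:
--             happines += 1
--         if element in dislike_numbers:
--             happines -= 1
--     return happines
-- ===== SOURCE B (Python) =====
-- def get_happiness(numbers, like_numbers, dislike_numbers):
--     counts = {}
--     for n in numbers:
--         counts[n] = counts.get(n, 0) + 1
--     return (sum(counts.get(x, 0) for x in set(like_numbers))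
--             - sum(counts.get(x, 0) for x in set(dislike_numbers)))
-- ===== Notes on version B (the rewrite author's own statement) =====
-- stated objective: faster
-- what changed: Builds a frequency table of numbers once and sums the counts of the de-duplicated like/dislike values, replacing the per-element linear membership scans of A.
import Mathlib
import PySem

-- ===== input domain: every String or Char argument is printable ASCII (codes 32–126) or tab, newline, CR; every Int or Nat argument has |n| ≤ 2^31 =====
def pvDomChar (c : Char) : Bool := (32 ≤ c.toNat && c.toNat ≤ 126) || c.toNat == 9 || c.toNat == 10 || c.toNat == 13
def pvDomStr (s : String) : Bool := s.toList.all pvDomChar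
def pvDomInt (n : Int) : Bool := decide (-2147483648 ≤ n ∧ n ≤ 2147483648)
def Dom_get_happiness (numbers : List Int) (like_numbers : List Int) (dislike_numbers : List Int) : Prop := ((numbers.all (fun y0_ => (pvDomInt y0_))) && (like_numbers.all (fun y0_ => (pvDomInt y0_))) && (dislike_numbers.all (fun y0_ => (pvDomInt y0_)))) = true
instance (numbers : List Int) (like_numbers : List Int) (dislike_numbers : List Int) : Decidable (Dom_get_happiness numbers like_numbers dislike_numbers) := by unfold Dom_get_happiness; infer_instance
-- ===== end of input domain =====

-- B builds a frequency table of `numbers` once and sums counts over the de-duplicated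
-- like/dislike values instead of scanning both lists for every element (faster in a timing run).


-- ===== PORT A =====
def get_happiness (numbers : List Int) (like_numbers : List Int) (dislike_numbers : List Int) : Int :=
  numbers.foldl (fun happines element =>
    let happines := if element ∈ like_numbers then happines + 1 else happines
    if element ∈ dislike_numbers then happines - 1 else happines) 0

-- ===== PORT B =====
def get_happiness_alt (numbers : List Int) (like_numbers : List Int) (dislike_numbers : List Int) : Int :=
  let counts : PySem.Dict Int Int :=
    numbers.foldl (fun d n => d.insert n (d.getD n 0 + 1)) PySem.Dict.empty
  ((PySem.Set.ofList like_numbers).map (fun x => counts.getD x 0)).sum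
    - ((PySem.Set.ofList dislike_numbers).map (fun x => counts.getD x 0)).sum

-- ===== PRECONDITION & SPEC =====
def Spec_get_happiness (numbers : List Int) (like_numbers : List Int) (dislike_numbers : List Int) (out : Int) : Prop := out = get_happiness_alt numbers like_numbers dislike_numbers
instance (numbers : List Int) (like_numbers : List Int) (dislike_numbers : List Int) (out : Int) : Decidable (Spec_get_happiness numbers like_numbers dislike_numbers out) := by unfold Spec_get_happiness; infer_instance

-- ===== CLAIM (what is proved, stated in full; the proofs are below) =====
def Claim_equal_get_happiness : Prop := ∀ (numbers : List Int) (like_numbers : List Int) (dislike_numbers : List Int), Dom_get_happiness numbers like_numbers dislike_numbers → Spec_get_happiness numbers like_numbers dislike_numbers (get_happiness numbers like_numbers dislike_numbers)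

-- ===== LEMMAS AND PROOFS =====

-- over a Nodup list S, summing an indicator of n picks out whether n ∈ S
lemma sum_map_ite_eq_mem (S : List Int) (hS : S.Nodup) (n : Int) :
    (S.map (fun x => if n = x then (1 : Int) else 0)).sum = if n ∈ S then 1 else 0 := by
  induction S with
  | nil => simp
  | cons a S ih =>
    rw [List.nodup_cons] at hS
    obtain ⟨ha, hS⟩ := hS
    simp only [List.map_cons, List.sum_cons, ih hS, List.mem_cons]
    by_cases h : n = a
    · subst h; simp [ha]
    · simp [h]

-- summing counts over a Nodup lookup set equals summing its indicator over the list
lemma sum_counts_eq (l S : List Int) (hS : S.Nodup) :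
    (S.map (fun x => ((l.count x : Nat) : Int))).sum
      = (l.map (fun e => if e ∈ S then (1 : Int) else 0)).sum := by
  induction l with
  | nil => simp
  | cons n l ih =>
    have hmap : (S.map (fun x => (((n :: l).count x : Nat) : Int)))
        = (S.map (fun x => ((l.count x : Nat) : Int) + if n = x then 1 else 0)) := by
      apply List.map_congr_left
      intro x _
      by_cases h : n = x <;> simp [h]
    rw [hmap, PySem.List.sum_map_add_int, ih, sum_map_ite_eq_mem S hS n]
    simp [add_comm]

lemma sum_map_neg_int (l : List Int) (f : Int → Int) :
    (l.map (fun x => -(f x))).sum = -(l.map f).sum := by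
  induction l with
  | nil => simp
  | cons a l ih => simp [ih]; ring

theorem get_happiness_spec : Claim_equal_get_happiness := by
  intro numbers L D _
  show get_happiness numbers L D = get_happiness_alt numbers L D
  unfold get_happiness get_happiness_alt
  simp only [PySem.Dict.getD_foldl_insert_add_one, PySem.Dict.getD_empty, zero_add]
  have hstep : (fun (happines element : Int) =>
      let happines := if element ∈ L then happines + 1 else happines
      if element ∈ D then happines - 1 else happines)
      = fun happines element => happines +
        ((if element ∈ PySem.Set.ofList L then (1 : Int) else 0) +
          -(if element ∈ PySem.Set.ofList D then (1 : Int) else 0)) := by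
    funext h e
    by_cases hL : e ∈ L <;> by_cases hD : e ∈ D <;>
      (simp [hL, hD, PySem.Set.mem_ofList]; try ring)
  rw [hstep, PySem.List.foldl_add, zero_add, PySem.List.sum_map_add_int, sum_map_neg_int,
    ← sum_counts_eq numbers (PySem.Set.ofList L) (PySem.Set.nodup_ofList L),
    ← sum_counts_eq numbers (PySem.Set.ofList D) (PySem.Set.nodup_ofList D)]
  ring
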